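-- pv_equiv track=rewrite | github.com/pypi-data/pypi-mirror-385 | packages/EulerKit/eulerkit-0.4.1b0.tar.gz/eulerkit-0.4.1b0/src/EulerKit/figuratenumbers.py | generateFigurateNumbers
-- ===== SOURCE A (Python) =====
-- def generateFigurateNumbers(lower:int, upper:int, type:str) -> list:
--     numbers = []
--     type = type.lower()
--     match type:
--         case "triangular":
--             for i in range(lower, upper + 1):
--                 numbers.append(i * (i + 1) // 2)
--             return numbers
--         case "square":
--             for i in range(lower, upper + 1):
--                 numbers.append(i ** 2)
--             return numbers
--         case "pentagonal":
--             for i in range(lower, upper):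
--                 numbers.append(i * ((3 * i) - 1) // 2)
--             return numbers
--         case "hexagonal":
--             for i in range(lower, upper):
--                 numbers.append(i * ((2 * i) - 1))
--             return numbers
--         case "heptagonal":
--             for i in range(lower, upper):
--                 numbers.append(i * ((5 * i) - 3) // 2)
--             return numbers
--         case "octagonal":
--             for i in range(lower, upper):
--                 numbers.append(i * ((3 * i) - 2))
--             return numbers
--         case "cubic":
--             for i in range(lower, upper):
--                 numbers.append(i ** 3)
--             return numbers
--         case "tetrahedal":
--             for i in range(lower, upper):
--                 numbers.append(i * (i + 1) * (i + 2) // 6)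
--             return numbers
--         case _:
--             return ["Invalid Type"]
-- ===== SOURCE B (Python) =====
-- def generateFigurateNumbers(lower: int, upper: int, type: str) -> list:
--     # Table-driven incremental recurrence: evaluate the closed form once (seed),
--     # then extend by the constant first-difference instead of re-evaluating it.
--     t = type.lower()
--     specs = {
--         "triangular": (1, lambda i: i * (i + 1) // 2, lambda i: i),
--         "square": (1, lambda i: i * i, lambda i: 2 * i - 1),
--         "pentagonal": (0, lambda i: i * (3 * i - 1) // 2, lambda i: 3 * i - 2),
--         "hexagonal": (0, lambda i: i * (2 * i - 1), lambda i: 4 * i - 3),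
--         "heptagonal": (0, lambda i: i * (5 * i - 3) // 2, lambda i: 5 * i - 4),
--         "octagonal": (0, lambda i: i * (3 * i - 2), lambda i: 6 * i - 5),
--         "cubic": (0, lambda i: i * i * i, lambda i: 3 * i * i - 3 * i + 1),
--         "tetrahedal": (0, lambda i: i * (i + 1) * (i + 2) // 6, lambda i: i * (i + 1) // 2),
--     }
--     if t not in specs:
--         return ["Invalid Type"]
--     extra, seed, diff = specs[t]
--     end = upper + extra
--     if lower >= end:
--         return []
--     cur = seed(lower)
--     out = [cur]
--     for i in range(lower + 1, end):
--         cur += diff(i)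
--         out.append(cur)
--     return out
-- ===== Notes on version B (the rewrite author's own statement) =====
-- stated objective: alternative
-- what changed: Replaces the per-type loops that re-evaluate the closed-form polynomial at every index with one table-driven generator that evaluates the closed form once at the lower bound and then extends the list by accumulating the first difference of each figurate sequence.
-- outside the precondition, e.g. on generateFigurateNumbers(0, 3, 'prime'): A returns ['Invalid Type'], B returns ['Invalid Type']
import Mathlib
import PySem

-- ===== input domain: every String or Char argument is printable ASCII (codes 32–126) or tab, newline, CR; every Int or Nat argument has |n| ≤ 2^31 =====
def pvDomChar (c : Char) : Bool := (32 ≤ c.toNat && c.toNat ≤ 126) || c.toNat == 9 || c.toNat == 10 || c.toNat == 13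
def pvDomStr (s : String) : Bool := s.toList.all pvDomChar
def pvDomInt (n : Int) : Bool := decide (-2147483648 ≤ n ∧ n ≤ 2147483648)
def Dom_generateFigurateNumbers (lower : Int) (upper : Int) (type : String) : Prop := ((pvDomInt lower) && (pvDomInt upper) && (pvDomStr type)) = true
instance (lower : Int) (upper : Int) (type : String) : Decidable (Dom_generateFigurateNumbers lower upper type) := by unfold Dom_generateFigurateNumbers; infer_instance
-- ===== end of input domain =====

-- B replaces per-element closed-form evaluation by a table-driven first-difference
-- recurrence (objective: alternative decomposition, same asymptotic cost).

-- ===== PORT A =====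
-- The default branch of the Python returns ["Invalid Type"], a list of str, not
-- representable as List Int; those inputs are excluded by Pre_ and the port
-- returns [] there (nothing is claimed about them).
def generateFigurateNumbers (lower : Int) (upper : Int) (type : String) : List Int :=
  let t := PySem.Str.lower type
  if t == "triangular" then
    (PySem.List.pyRange lower (upper + 1) 1).foldl
      (fun numbers i => numbers ++ [PySem.Int.floordiv (i * (i + 1)) 2]) []
  else if t == "square" then
    (PySem.List.pyRange lower (upper + 1) 1).foldl
      (fun numbers i => numbers ++ [i ^ 2]) []
  else if t == "pentagonal" then
    (PySem.List.pyRange lower upper 1).foldl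
      (fun numbers i => numbers ++ [PySem.Int.floordiv (i * ((3 * i) - 1)) 2]) []
  else if t == "hexagonal" then
    (PySem.List.pyRange lower upper 1).foldl
      (fun numbers i => numbers ++ [i * ((2 * i) - 1)]) []
  else if t == "heptagonal" then
    (PySem.List.pyRange lower upper 1).foldl
      (fun numbers i => numbers ++ [PySem.Int.floordiv (i * ((5 * i) - 3)) 2]) []
  else if t == "octagonal" then
    (PySem.List.pyRange lower upper 1).foldl
      (fun numbers i => numbers ++ [i * ((3 * i) - 2)]) []
  else if t == "cubic" then
    (PySem.List.pyRange lower upper 1).foldl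
      (fun numbers i => numbers ++ [i ^ 3]) []
  else if t == "tetrahedal" then
    (PySem.List.pyRange lower upper 1).foldl
      (fun numbers i => numbers ++ [PySem.Int.floordiv (i * (i + 1) * (i + 2)) 6]) []
  else []  -- Python: ["Invalid Type"] (list of str); outside Pre_

-- ===== PORT B =====
-- spec table: type ↦ (extra bound, seed closed form, first difference)
def pvSpecs : PySem.Dict String (Int × (Int → Int) × (Int → Int)) :=
  PySem.Dict.ofList
    [ ("triangular", (1, fun i => PySem.Int.floordiv (i * (i + 1)) 2, fun i => i))
    , ("square", (1, fun i => i * i, fun i => 2 * i - 1))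
    , ("pentagonal", (0, fun i => PySem.Int.floordiv (i * (3 * i - 1)) 2, fun i => 3 * i - 2))
    , ("hexagonal", (0, fun i => i * (2 * i - 1), fun i => 4 * i - 3))
    , ("heptagonal", (0, fun i => PySem.Int.floordiv (i * (5 * i - 3)) 2, fun i => 5 * i - 4))
    , ("octagonal", (0, fun i => i * (3 * i - 2), fun i => 6 * i - 5))
    , ("cubic", (0, fun i => i * i * i, fun i => 3 * i * i - 3 * i + 1))
    , ("tetrahedal", (0, fun i => PySem.Int.floordiv (i * (i + 1) * (i + 2)) 6,
                         fun i => PySem.Int.floordiv (i * (i + 1)) 2)) ]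

def generateFigurateNumbers_alt (lower : Int) (upper : Int) (type : String) : List Int :=
  let t := PySem.Str.lower type
  match PySem.Dict.get? pvSpecs t with
  | none => []  -- Python: ["Invalid Type"] (list of str); outside Pre_
  | some (extra, seed, diff) =>
    let e := upper + extra
    if lower ≥ e then []
    else
      let c0 := seed lower
      ((PySem.List.pyRange (lower + 1) e 1).foldl
        (fun p i => (p.1 ++ [p.2 + diff i], p.2 + diff i)) ([c0], c0)).1

-- ===== PRECONDITION & SPEC =====
-- Pre_ excludes the types A does not recognize, on which A returns ["Invalid Type"],
-- a list of str that is not a value of the declared return type list[int].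
def Pre_generateFigurateNumbers (lower : Int) (upper : Int) (type : String) : Prop :=
  PySem.Str.lower type ∈ ["triangular", "square", "pentagonal", "hexagonal",
                          "heptagonal", "octagonal", "cubic", "tetrahedal"]
instance (lower : Int) (upper : Int) (type : String) : Decidable (Pre_generateFigurateNumbers lower upper type) := by unfold Pre_generateFigurateNumbers; infer_instance

def pvWitness_generateFigurateNumbers : Int × Int × String := (-3, 5, "Triangular")

def Spec_generateFigurateNumbers (lower : Int) (upper : Int) (type : String) (out : List Int) : Prop := out = generateFigurateNumbers_alt lower upper type
instance (lower : Int) (upper : Int) (type : String) (out : List Int) : Decidable (Spec_generateFigurateNumbers lower upper type out) := by unfold Spec_generateFigurateNumbers; infer_instance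

-- ===== CLAIM (what is proved, stated in full; the proofs are below) =====
def Claim_equal_generateFigurateNumbers : Prop := ∀ (lower : Int) (upper : Int) (type : String), Dom_generateFigurateNumbers lower upper type → Pre_generateFigurateNumbers lower upper type → Spec_generateFigurateNumbers lower upper type (generateFigurateNumbers lower upper type)

-- ===== LEMMAS AND PROOFS =====

-- B's accumulate-the-difference loop produces the mapped closed form: core induction.
theorem pvAccCore (f d : Int → Int) (h : ∀ i, f i = f (i - 1) + d i) :
    ∀ (n : Nat) (a : Int) (acc : List Int),
    ((PySem.List.pyRange a (a + n) 1).foldl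
        (fun p i => (p.1 ++ [p.2 + d i], p.2 + d i)) (acc, f (a - 1))).1
      = acc ++ (PySem.List.pyRange a (a + n) 1).map f := by
  intro n
  induction n with
  | zero =>
    intro a acc
    rw [PySem.List.pyRange_one_eq_nil (by omega : a + ((0:Nat):Int) ≤ a)]
    simp
  | succ m ih =>
    intro a acc
    have hab : a < a + ((m + 1 : Nat) : Int) := by push_cast; omega
    rw [PySem.List.pyRange_one_cons hab]
    simp only [List.foldl_cons, List.map_cons]
    have hstep : f (a - 1) + d a = f a := (h a).symm
    have hb : a + ((m + 1 : Nat) : Int) = (a + 1) + ((m : Nat) : Int) := by push_cast; ring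
    rw [hstep, hb]
    have hthis := ih (a + 1) (acc ++ [f a])
    simp only [show (a + 1) - 1 = a from by ring] at hthis
    rw [hthis]
    simp

theorem pvAcc (f d : Int → Int) (h : ∀ i, f i = f (i - 1) + d i)
    (a b : Int) (hab : a < b) :
    ((PySem.List.pyRange (a + 1) b 1).foldl
        (fun p i => (p.1 ++ [p.2 + d i], p.2 + d i)) ([f a], f a)).1
      = (PySem.List.pyRange a b 1).map f := by
  have hb : b = (a + 1) + (((b - (a + 1)).toNat : Nat) : Int) := by omega
  have hcore := pvAccCore f d h (b - (a + 1)).toNat (a + 1) [f a]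
  simp only [show (a + 1) - 1 = a from by ring] at hcore
  rw [PySem.List.pyRange_one_cons hab, List.map_cons, hb, hcore]
  simp

-- divisibility facts for the floordiv recurrences
theorem pvEven_tri (i : Int) : i * (i + 1) % 2 = 0 :=
  Int.even_iff.mp (Int.even_mul_succ_self i)

theorem pvEven_pent (i : Int) : i * (3 * i - 1) % 2 = 0 := by
  rcases Int.even_or_odd i with ⟨k, hk⟩ | ⟨k, hk⟩ <;> subst hk
  · rw [show (k + k) * (3 * (k + k) - 1) = 2 * (k * (6 * k - 1)) from by ring]
    exact Int.mul_emod_right 2 _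
  · rw [show (2 * k + 1) * (3 * (2 * k + 1) - 1) = 2 * ((2 * k + 1) * (3 * k + 1)) from by ring]
    exact Int.mul_emod_right 2 _

theorem pvEven_hept (i : Int) : i * (5 * i - 3) % 2 = 0 := by
  rcases Int.even_or_odd i with ⟨k, hk⟩ | ⟨k, hk⟩ <;> subst hk
  · rw [show (k + k) * (5 * (k + k) - 3) = 2 * (k * (10 * k - 3)) from by ring]
    exact Int.mul_emod_right 2 _
  · rw [show (2 * k + 1) * (5 * (2 * k + 1) - 3) = 2 * ((2 * k + 1) * (5 * k + 1)) from by ring]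
    exact Int.mul_emod_right 2 _

theorem pvSix_tet (i : Int) : i * (i + 1) * (i + 2) % 6 = 0 := by
  obtain ⟨k, hk⟩ : (2 : Int) ∣ i * (i + 1) := Int.dvd_of_emod_eq_zero (pvEven_tri i)
  have h2 : i * (i + 1) * (i + 2) % 2 = 0 := by
    rw [show i * (i + 1) * (i + 2) = 2 * (k * (i + 2)) from by rw [hk]; ring]
    exact Int.mul_emod_right 2 _
  have h3 : i * (i + 1) * (i + 2) % 3 = 0 := by
    have hr : i % 3 = 0 ∨ i % 3 = 1 ∨ i % 3 = 2 := by omega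
    obtain ⟨q, hq⟩ : ∃ q : Int, i = 3 * q + i % 3 := ⟨i / 3, by omega⟩
    rcases hr with h | h | h <;> rw [h] at hq <;> rw [hq]
    · rw [show (3 * q + 0) * ((3 * q + 0) + 1) * ((3 * q + 0) + 2)
            = 3 * (q * (3 * q + 1) * (3 * q + 2)) from by ring]
      exact Int.mul_emod_right 3 _
    · rw [show (3 * q + 1) * ((3 * q + 1) + 1) * ((3 * q + 1) + 2)
            = 3 * ((3 * q + 1) * (3 * q + 2) * (q + 1)) from by ring]
      exact Int.mul_emod_right 3 _
    · rw [show (3 * q + 2) * ((3 * q + 2) + 1) * ((3 * q + 2) + 2)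
            = 3 * ((3 * q + 2) * (q + 1) * (3 * q + 4)) from by ring]
      exact Int.mul_emod_right 3 _
  generalize i * (i + 1) * (i + 2) = x at h2 h3 ⊢
  omega

-- the four recurrence identities involving floordiv
theorem pvRec_tri (i : Int) :
    PySem.Int.floordiv (i * (i + 1)) 2
      = PySem.Int.floordiv ((i - 1) * ((i - 1) + 1)) 2 + i := by
  rw [PySem.Int.floordiv_eq_ediv_of_pos (by norm_num), PySem.Int.floordiv_eq_ediv_of_pos (by norm_num)]
  have h2 := pvEven_tri i
  rw [show (i - 1) * ((i - 1) + 1) = i * (i + 1) - 2 * i from by ring]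
  generalize i * (i + 1) = A at h2 ⊢
  omega

theorem pvRec_pent (i : Int) :
    PySem.Int.floordiv (i * (3 * i - 1)) 2
      = PySem.Int.floordiv ((i - 1) * (3 * (i - 1) - 1)) 2 + (3 * i - 2) := by
  rw [PySem.Int.floordiv_eq_ediv_of_pos (by norm_num), PySem.Int.floordiv_eq_ediv_of_pos (by norm_num)]
  have h2 := pvEven_pent i
  rw [show (i - 1) * (3 * (i - 1) - 1) = i * (3 * i - 1) - 2 * (3 * i - 2) from by ring]
  generalize i * (3 * i - 1) = A at h2 ⊢
  omega

theorem pvRec_hept (i : Int) :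
    PySem.Int.floordiv (i * (5 * i - 3)) 2
      = PySem.Int.floordiv ((i - 1) * (5 * (i - 1) - 3)) 2 + (5 * i - 4) := by
  rw [PySem.Int.floordiv_eq_ediv_of_pos (by norm_num), PySem.Int.floordiv_eq_ediv_of_pos (by norm_num)]
  have h2 := pvEven_hept i
  rw [show (i - 1) * (5 * (i - 1) - 3) = i * (5 * i - 3) - 2 * (5 * i - 4) from by ring]
  generalize i * (5 * i - 3) = A at h2 ⊢
  omega

theorem pvRec_tet (i : Int) :
    PySem.Int.floordiv (i * (i + 1) * (i + 2)) 6
      = PySem.Int.floordiv ((i - 1) * ((i - 1) + 1) * ((i - 1) + 2)) 6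
        + PySem.Int.floordiv (i * (i + 1)) 2 := by
  rw [PySem.Int.floordiv_eq_ediv_of_pos (by norm_num : (0:Int) < 6),
      PySem.Int.floordiv_eq_ediv_of_pos (by norm_num : (0:Int) < 6),
      PySem.Int.floordiv_eq_ediv_of_pos (by norm_num : (0:Int) < 2)]
  have h6 := pvSix_tet i
  have h2 := pvEven_tri i
  rw [show (i - 1) * ((i - 1) + 1) * ((i - 1) + 2) = i * (i + 1) * (i + 2) - 3 * (i * (i + 1)) from by ring]
  generalize ht : i * (i + 1) = t at h6 h2 ⊢
  generalize t * (i + 2) = x at h6 ⊢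
  omega

-- one branch of the equivalence, generic in the bound and the formulas
theorem pvBranch (fA f d : Int → Int) (a b : Int)
    (hfa : fA = f) (h : ∀ i, f i = f (i - 1) + d i) :
    (PySem.List.pyRange a b 1).foldl (fun numbers i => numbers ++ [fA i]) []
      = (if a ≥ b then []
         else ((PySem.List.pyRange (a + 1) b 1).foldl
            (fun p i => (p.1 ++ [p.2 + d i], p.2 + d i)) ([f a], f a)).1) := by
  rw [hfa]
  by_cases hab : a ≥ b
  · rw [if_pos hab, PySem.List.pyRange_one_eq_nil hab]
    rfl
  · rw [if_neg hab, PySem.List.foldl_append_singleton_eq_map, List.nil_append,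
        pvAcc f d h a b (by omega)]

-- ===== VERDICT (by name: the statement is the Claim_ definition above) =====
theorem generateFigurateNumbers_spec : Claim_equal_generateFigurateNumbers := by
  intro lower upper type _ hpre
  unfold Spec_generateFigurateNumbers generateFigurateNumbers generateFigurateNumbers_alt
  unfold Pre_generateFigurateNumbers at hpre
  simp only [List.mem_cons, List.not_mem_nil, or_false] at hpre
  rcases hpre with h | h | h | h | h | h | h | h <;> simp only [h, String.reduceBEq, beq_self_eq_true, Bool.false_eq_true, if_true, if_false]
  · rw [show pvSpecs.get? "triangular"
        = some (1, fun i => PySem.Int.floordiv (i * (i + 1)) 2, fun i => i) from rfl]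
    exact pvBranch _ _ (fun i => i) lower (upper + 1) rfl pvRec_tri
  · rw [show pvSpecs.get? "square"
        = some (1, fun i => i * i, fun i => 2 * i - 1) from rfl]
    exact pvBranch _ (fun i => i * i) (fun i => 2 * i - 1) lower (upper + 1) (by funext i; ring) (fun i => by ring)
  · rw [show pvSpecs.get? "pentagonal"
        = some (0, fun i => PySem.Int.floordiv (i * (3 * i - 1)) 2, fun i => 3 * i - 2) from rfl]
    simp only [add_zero]
    exact pvBranch _ _ (fun i => 3 * i - 2) lower upper rfl pvRec_pent
  · rw [show pvSpecs.get? "hexagonal"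
        = some (0, fun i => i * (2 * i - 1), fun i => 4 * i - 3) from rfl]
    simp only [add_zero]
    exact pvBranch _ (fun i => i * (2 * i - 1)) (fun i => 4 * i - 3) lower upper rfl (fun i => by ring)
  · rw [show pvSpecs.get? "heptagonal"
        = some (0, fun i => PySem.Int.floordiv (i * (5 * i - 3)) 2, fun i => 5 * i - 4) from rfl]
    simp only [add_zero]
    exact pvBranch _ _ (fun i => 5 * i - 4) lower upper rfl pvRec_hept
  · rw [show pvSpecs.get? "octagonal"
        = some (0, fun i => i * (3 * i - 2), fun i => 6 * i - 5) from rfl]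
    simp only [add_zero]
    exact pvBranch _ (fun i => i * (3 * i - 2)) (fun i => 6 * i - 5) lower upper rfl (fun i => by ring)
  · rw [show pvSpecs.get? "cubic"
        = some (0, fun i => i * i * i, fun i => 3 * i * i - 3 * i + 1) from rfl]
    simp only [add_zero]
    exact pvBranch _ (fun i => i * i * i) (fun i => 3 * i * i - 3 * i + 1) lower upper (by funext i; ring) (fun i => by ring)
  · rw [show pvSpecs.get? "tetrahedal"
        = some (0, fun i => PySem.Int.floordiv (i * (i + 1) * (i + 2)) 6,
                   fun i => PySem.Int.floordiv (i * (i + 1)) 2) from rfl]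
    simp only [add_zero]
    exact pvBranch _ _ (fun i => PySem.Int.floordiv (i * (i + 1)) 2) lower upper rfl pvRec_tet
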